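-- pv_equiv track=rewrite | github.com/Mao-beta/AtCoder | ABC/ABC403/ABC403D.py | guchoku
-- ===== SOURCE A (Python) =====
-- from itertools import accumulate, combinations, permutations, product
--
-- def guchoku(N, D, A):
--     for r in range(N+1):
--         for B in combinations(A, N-r):
--             ok = True
--             for i in range(N-r):
--                 for j in range(i+1, N-r):
--                     if abs(B[i]-B[j]) == D:
--                         ok = False
--                         break
--                 if not ok:
--                     break
--             if ok:
--                 return r
-- ===== SOURCE B (Python) =====
-- def guchoku(N, D, A):
--     if D < 0:
--         good = len(A)
--     elif D == 0:
--         good = len(set(A))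
--     else:
--         cnt = {}
--         for v in A:
--             cnt[v] = cnt.get(v, 0) + 1
--         chains = {}
--         for v in sorted(cnt):
--             chains.setdefault(v % D, []).append(v)
--         good = 0
--         for chain in chains.values():
--             take, skip, prev = 0, 0, None
--             for v in chain:
--                 if prev is not None and v - prev == D:
--                     take, skip = skip + cnt[v], max(take, skip)
--                 else:
--                     b = max(take, skip)
--                     take, skip = b + cnt[v], b
--                 prev = v
--             good += max(take, skip)
--     return max(N - good, 0)
-- ===== Notes on version B (the rewrite author's own statement) =====
-- stated objective: alternative
-- what changed: A enumerates combinations of kept elements by increasing deletion count with a quadratic pairwise check; B instead counts values, groups the distinct values into residue-mod-D chains and computes the maximum-weight independent set of each chain with a take/skip DP (special-casing D<0 and D==0), returning max(N - best, 0).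
-- outside the precondition, e.g. on guchoku(-1, 1, []): A returns None, B returns 0
import Mathlib
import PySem

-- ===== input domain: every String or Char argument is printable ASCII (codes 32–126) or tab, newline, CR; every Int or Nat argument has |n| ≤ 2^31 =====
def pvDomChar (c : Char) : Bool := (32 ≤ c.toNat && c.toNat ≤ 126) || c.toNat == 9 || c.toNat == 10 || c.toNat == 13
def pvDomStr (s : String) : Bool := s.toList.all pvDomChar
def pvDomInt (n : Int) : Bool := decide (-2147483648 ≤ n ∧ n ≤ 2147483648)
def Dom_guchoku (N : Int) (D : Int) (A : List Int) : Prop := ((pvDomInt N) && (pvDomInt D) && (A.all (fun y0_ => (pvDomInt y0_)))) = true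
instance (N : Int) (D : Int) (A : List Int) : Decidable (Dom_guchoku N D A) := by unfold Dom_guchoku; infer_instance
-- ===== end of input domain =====

-- B computes the answer differently: it counts values, groups the distinct values into
-- mod-D chains and runs a take/skip DP per chain, instead of A's scan over combinations.


-- ===== PORT A =====
-- the 'for i … for j …' pairwise check with its break flags: true iff no pair differs by exactly D
def pvOk (D : Int) : List Int → Bool
  | [] => true
  | x :: xs => (xs.all (fun y => !(|x - y| == D))) && pvOk D xs

-- 'for B in combinations(A, k): if ok: return r' — only existence matters for the returned value
def pvAnyComb (D : Int) (k : Nat) (A : List Int) : Bool := (List.sublistsLen k A).any (pvOk D)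

-- 'for r in range(N+1)'; Python returns None when the loop exhausts (only when N < 0, outside Pre_)
def pvLoopA (D : Int) (N : Int) (A : List Int) : List Int → Int
  | [] => 0
  | r :: rs => if pvAnyComb D (N - r).toNat A then r else pvLoopA D N A rs

def guchoku (N : Int) (D : Int) (A : List Int) : Int :=
  pvLoopA D N A (PySem.List.pyRange 0 (N + 1) 1)

-- ===== PORT B =====
-- one take/skip DP step of Source B's inner 'for v in chain' loop; state (take, skip, prev)
def pvStep (cnt : PySem.Dict Int Int) (D : Int) (st : Int × Int × Option Int) (v : Int) : Int × Int × Option Int :=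
  match st with
  | (t, s, some p) =>
    if v - p == D then (s + cnt.getD v 0, max t s, some v)
    else (max t s + cnt.getD v 0, max t s, some v)
  | (t, s, none) => (max t s + cnt.getD v 0, max t s, some v)

def guchoku_alt (N : Int) (D : Int) (A : List Int) : Int :=
  let good : Int :=
    if D < 0 then (A.length : Int)
    else if D = 0 then ((PySem.Set.ofList A).length : Int)
    else
      let cnt : PySem.Dict Int Int := A.foldl (fun d v => d.insert v (d.getD v 0 + 1)) PySem.Dict.empty
      let chains : PySem.Dict Int (List Int) :=
        (PySem.List.sorted cnt.keys (fun x => x) false).foldl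
          (fun d v => d.modify (PySem.Int.mod v D) [] (· ++ [v])) PySem.Dict.empty
      chains.values.foldl
        (fun g chain =>
          let st := chain.foldl (pvStep cnt D) (0, 0, none)
          g + max st.1 st.2.1) 0
  max (N - good) 0

-- ===== PRECONDITION & SPEC =====
-- Pre_ excludes N < 0, on which A's loop body never runs and Python returns None (not an int).
def Pre_guchoku (N : Int) (D : Int) (A : List Int) : Prop := 0 ≤ N
instance (N : Int) (D : Int) (A : List Int) : Decidable (Pre_guchoku N D A) := by unfold Pre_guchoku; infer_instance
def pvWitness_guchoku : Int × Int × List Int := (3, 1, [1, 2, 4])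

def Spec_guchoku (N : Int) (D : Int) (A : List Int) (out : Int) : Prop := out = guchoku_alt N D A
instance (N : Int) (D : Int) (A : List Int) (out : Int) : Decidable (Spec_guchoku N D A out) := by unfold Spec_guchoku; infer_instance

-- ===== CLAIM (what is proved, stated in full; the proofs are below) =====
def Claim_equal_guchoku : Prop := ∀ (N : Int) (D : Int) (A : List Int), Dom_guchoku N D A → Pre_guchoku N D A → Spec_guchoku N D A (guchoku N D A)

-- ===== LEMMAS AND PROOFS =====

def Gd (D : Int) (B : List Int) : Prop := B.Pairwise (fun a b => |a - b| ≠ D)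
def wsum (w : Int → Int) (B : List Int) : Int := (B.map w).sum

def WB (D : Int) (w : Int → Int) : List Int → Int
  | [] => 0
  | x :: xs => max (WB D w xs) (w x + WB D w (xs.filter (fun u => |u - x| ≠ D)))
termination_by xs => xs.length
decreasing_by
  all_goals simp only [List.length_cons]
  · omega
  · simp only [List.length_unattach]
    exact Nat.lt_succ_of_le (by simpa using List.length_filter_le _ xs.attach)


theorem WB_ge_aux (D : Int) (w : Int → Int) : ∀ (n : Nat) (xs B : List Int), xs.length ≤ n → B.Sublist xs → Gd D B → wsum w B ≤ WB D w xs := by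
  intro n
  induction n with
  | zero =>
    intro xs B hn hB _
    rw [List.length_eq_zero_iff.mp (Nat.le_zero.mp hn)] at hB ⊢
    simp [List.sublist_nil.mp hB, wsum, WB]
  | succ n ih =>
    intro xs B hn hB hG
    match xs with
    | [] => simp [List.sublist_nil.mp hB, wsum, WB]
    | x :: xs =>
      rw [WB]
      rcases List.sublist_cons_iff.mp hB with h | ⟨B', rfl, hB'⟩
      · refine le_trans (ih xs B ?_ h hG) (le_max_left _ _)
        simp at hn; omega
      · rw [Gd, List.pairwise_cons] at hG
        obtain ⟨hx, hG'⟩ := hG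
        have hBf : B' = B'.filter (fun u => |u - x| ≠ D) := by
          symm; rw [List.filter_eq_self]
          intro a ha
          simpa [abs_sub_comm] using hx a ha
        have hsub : B'.Sublist (xs.filter (fun u => |u - x| ≠ D)) := by
          rw [hBf]; exact List.Sublist.filter _ hB'
        have h2 := ih (xs.filter (fun u => |u - x| ≠ D)) B'
          (by simp only [List.length_cons] at hn
              exact le_trans (List.length_filter_le _ _) (by omega))
          hsub hG'
        have h3 : wsum w (x :: B') ≤ w x + WB D w (xs.filter (fun u => |u - x| ≠ D)) := by
          simp only [wsum, List.map_cons, List.sum_cons] at h2 ⊢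
          exact add_le_add le_rfl h2
        exact le_trans h3 (le_max_right _ _)

theorem WB_ge (D : Int) (w : Int → Int) (xs B : List Int) (hB : B.Sublist xs) (hG : Gd D B) :
    wsum w B ≤ WB D w xs :=
  WB_ge_aux D w xs.length xs B le_rfl hB hG

theorem WB_exists_aux (D : Int) (w : Int → Int) : ∀ (n : Nat) (xs : List Int), xs.length ≤ n → ∃ B, B.Sublist xs ∧ Gd D B ∧ wsum w B = WB D w xs := by
  intro n
  induction n with
  | zero =>
    intro xs hn
    rw [List.length_eq_zero_iff.mp (Nat.le_zero.mp hn)]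
    exact ⟨[], List.Sublist.refl _, by simp [Gd], by simp [wsum, WB]⟩
  | succ n ih =>
    intro xs hn
    match xs with
    | [] => exact ⟨[], List.Sublist.refl _, by simp [Gd], by simp [wsum, WB]⟩
    | x :: xs =>
      obtain ⟨B1, hs1, hg1, hw1⟩ := ih xs (by simp at hn; omega)
      obtain ⟨B2, hs2, hg2, hw2⟩ := ih (xs.filter (fun u => |u - x| ≠ D))
        (by simp only [List.length_cons] at hn
            exact le_trans (List.length_filter_le _ _) (by omega))
      rw [WB]
      rcases le_total (w x + WB D w (xs.filter (fun u => |u - x| ≠ D))) (WB D w xs) with h | h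
      · exact ⟨B1, hs1.trans (List.sublist_cons_self _ _), hg1, by rw [hw1, max_eq_left h]⟩
      · refine ⟨x :: B2, ?_, ?_, ?_⟩
        · exact List.Sublist.cons₂ x (hs2.trans List.filter_sublist)
        · rw [Gd, List.pairwise_cons]
          refine ⟨fun y hy => ?_, hg2⟩
          have := List.of_mem_filter (hs2.subset hy)
          simpa [abs_sub_comm] using this
        · simp only [wsum, List.map_cons, List.sum_cons, wsum] at hw2 ⊢
          rw [hw2, max_eq_right h]

theorem WB_exists (D : Int) (w : Int → Int) (xs : List Int) : ∃ B, B.Sublist xs ∧ Gd D B ∧ wsum w B = WB D w xs :=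
  WB_exists_aux D w xs.length xs le_rfl

theorem WB_nonneg (D : Int) (w : Int → Int) (xs : List Int) : 0 ≤ WB D w xs := by
  have h := WB_ge D w xs [] (List.nil_sublist xs) List.Pairwise.nil
  simpa [wsum] using h

theorem Gd_symm (D : Int) : Symmetric (fun a b : Int => |a - b| ≠ D) := by
  intro a b h; rwa [abs_sub_comm]

theorem Gd_perm {D : Int} {B B' : List Int} (h : B.Perm B') (hg : Gd D B) : Gd D B' :=
  (List.Perm.pairwise_iff (fun hx => Gd_symm D hx) h).mp hg

theorem wsum_perm {w : Int → Int} {B B' : List Int} (h : B.Perm B') : wsum w B = wsum w B' :=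
  List.Perm.sum_eq (List.Perm.map w h)

theorem WB_ge' (D : Int) (w : Int → Int) (xs B : List Int) (h : B.Subperm xs) (hg : Gd D B) :
    wsum w B ≤ WB D w xs := by
  obtain ⟨B', hp, hs⟩ := h
  calc wsum w B = wsum w B' := wsum_perm hp.symm
    _ ≤ WB D w xs := WB_ge D w xs B' hs (Gd_perm hp.symm hg)

theorem WB_perm (D : Int) (w : Int → Int) {xs ys : List Int} (h : xs.Perm ys) : WB D w xs = WB D w ys := by
  refine le_antisymm ?_ ?_
  · obtain ⟨B, hs, hg, hw⟩ := WB_exists D w xs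
    rw [← hw]
    exact WB_ge' D w ys B (hs.subperm.trans h.subperm) hg
  · obtain ⟨B, hs, hg, hw⟩ := WB_exists D w ys
    rw [← hw]
    exact WB_ge' D w xs B (hs.subperm.trans h.symm.subperm) hg

theorem WB_append (D : Int) (w : Int → Int) (us vs : List Int)
    (h : ∀ u ∈ us, ∀ v ∈ vs, |u - v| ≠ D) : WB D w (us ++ vs) = WB D w us + WB D w vs := by
  refine le_antisymm ?_ ?_
  · obtain ⟨B, hs, hg, hw⟩ := WB_exists D w (us ++ vs)
    rw [← hw]
    obtain ⟨B1, B2, rfl, h1, h2⟩ := List.sublist_append_iff.mp hs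
    rw [Gd, List.pairwise_append] at hg
    obtain ⟨hg1, hg2, _⟩ := hg
    have : wsum w (B1 ++ B2) = wsum w B1 + wsum w B2 := by simp [wsum]
    rw [this]
    exact add_le_add (WB_ge D w us B1 h1 hg1) (WB_ge D w vs B2 h2 hg2)
  · obtain ⟨B1, hs1, hg1, hw1⟩ := WB_exists D w us
    obtain ⟨B2, hs2, hg2, hw2⟩ := WB_exists D w vs
    rw [← hw1, ← hw2]
    have hsum : wsum w B1 + wsum w B2 = wsum w (B1 ++ B2) := by simp [wsum]
    rw [hsum]
    refine WB_ge D w (us ++ vs) (B1 ++ B2) (List.Sublist.append hs1 hs2) ?_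
    rw [Gd, List.pairwise_append]
    exact ⟨hg1, hg2, fun a ha b hb => h a (hs1.subset ha) b (hs2.subset hb)⟩

theorem WB_concat (D : Int) (w : Int → Int) (xs : List Int) (v : Int) :
    WB D w (xs ++ [v]) = max (WB D w xs) (w v + WB D w (xs.filter (fun u => |u - v| ≠ D))) := by
  refine le_antisymm ?_ ?_
  · obtain ⟨B, hs, hg, hw⟩ := WB_exists D w (xs ++ [v])
    rw [← hw]
    obtain ⟨B1, B2, rfl, h1, h2⟩ := List.sublist_append_iff.mp hs
    rcases List.sublist_singleton.mp h2 with rfl | rfl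
    · simp only [List.append_nil]
      exact le_trans (WB_ge D w xs B1 h1 (by simpa using hg)) (le_max_left _ _)
    · rw [Gd, List.pairwise_append] at hg
      obtain ⟨hg1, _, hcross⟩ := hg
      have hB1f : B1 = B1.filter (fun u => |u - v| ≠ D) := by
        symm; rw [List.filter_eq_self]
        intro a ha
        simpa using hcross a ha v (by simp)
      have hsub : B1.Sublist (xs.filter (fun u => |u - v| ≠ D)) := by
        rw [hB1f]; exact List.Sublist.filter _ h1
      have : wsum w (B1 ++ [v]) = w v + wsum w B1 := by simp [wsum]; ring
      rw [this]
      exact le_trans (add_le_add le_rfl (WB_ge D w _ B1 hsub hg1)) (le_max_right _ _)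
  · rw [max_le_iff]
    constructor
    · obtain ⟨B, hs, hg, hw⟩ := WB_exists D w xs
      rw [← hw]
      exact WB_ge D w _ B (hs.trans (List.sublist_append_left _ _)) hg
    · obtain ⟨B, hs, hg, hw⟩ := WB_exists D w (xs.filter (fun u => |u - v| ≠ D))
      rw [← hw]
      have : w v + wsum w B = wsum w (B ++ [v]) := by simp [wsum]; ring
      rw [this]
      refine WB_ge D w _ (B ++ [v]) (List.Sublist.append (hs.trans List.filter_sublist) (List.Sublist.refl _)) ?_
      rw [Gd, List.pairwise_append]
      refine ⟨hg, by simp [Gd], fun a ha b hb => ?_⟩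
      simp only [List.mem_singleton] at hb
      subst hb
      simpa using List.of_mem_filter (hs.subset ha)

theorem wsum_one (B : List Int) : wsum (fun _ => 1) B = (B.length : Int) := by
  simp [wsum]


-- D < 0: every list is good
theorem WB_neg (D : Int) (hD : D < 0) (xs : List Int) : WB D (fun _ => 1) xs = (xs.length : Int) := by
  refine le_antisymm ?_ ?_
  · obtain ⟨B, hs, _, hw⟩ := WB_exists D (fun _ => 1) xs
    rw [← hw, wsum_one]
    exact_mod_cast hs.length_le
  · rw [← wsum_one xs]
    refine WB_ge D _ xs xs (List.Sublist.refl _) ?_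
    refine List.pairwise_of_forall_mem_list fun a _ b _ => ?_
    have := abs_nonneg (a - b); omega

-- D = 0: good lists are exactly nodup lists
theorem Gd_zero_iff (B : List Int) : Gd 0 B ↔ B.Nodup := by
  unfold Gd List.Nodup
  constructor <;> intro h <;> refine h.imp ?_ <;> intro a b hab
  · intro h2; subst h2; simp at hab
  · simp [sub_eq_zero, hab]

theorem WB_zero (xs : List Int) : WB 0 (fun _ => 1) xs = ((PySem.Set.ofList xs).length : Int) := by
  refine le_antisymm ?_ ?_
  · obtain ⟨B, hs, hg, hw⟩ := WB_exists 0 (fun _ => 1) xs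
    rw [← hw, wsum_one]
    have hnd : B.Nodup := (Gd_zero_iff B).mp hg
    have hsp : B.Subperm (PySem.Set.ofList xs) :=
      hnd.subperm (fun a ha => (PySem.Set.mem_ofList xs a).mpr (hs.subset ha))
    exact_mod_cast hsp.length_le
  · rw [← wsum_one (PySem.Set.ofList xs)]
    refine WB_ge' 0 _ xs _ ((PySem.Set.nodup_ofList xs).subperm (fun a ha => (PySem.Set.mem_ofList xs a).mp ha)) ?_
    exact (Gd_zero_iff _).mpr (PySem.Set.nodup_ofList xs)

theorem countP_cons_mem (v : Int) (S A : List Int) (hv : v ∉ S) :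
    A.countP (fun a => decide (a ∈ v :: S)) = A.count v + A.countP (fun a => decide (a ∈ S)) := by
  induction A with
  | nil => simp
  | cons a A ih =>
    by_cases h1 : a = v
    · subst h1
      simp only [List.countP_cons, List.count_cons, ih]
      simp [hv]
      omega
    · by_cases h2 : a ∈ S <;>
        simp only [List.countP_cons, List.count_cons, ih] <;>
        simp [h1, h2] <;> omega

theorem countP_mem_eq_sum (A : List Int) : ∀ (S : List Int), S.Nodup →
    ((A.countP (fun a => decide (a ∈ S)) : Nat) : Int) = (S.map (fun v => (A.count v : Int))).sum := by
  intro S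
  induction S with
  | nil => simp
  | cons v S ih =>
    intro hnd
    rw [List.nodup_cons] at hnd
    rw [countP_cons_mem v S A hnd.1]
    push_cast
    rw [ih hnd.2]
    simp

-- the list-level optimum equals the distinct-value-level optimum weighted by counts (D > 0)
theorem WB_bridge (D : Int) (hD : 0 < D) (A vals : List Int) (hnd : vals.Nodup)
    (hmem : ∀ x, x ∈ vals ↔ x ∈ A) :
    WB D (fun _ => 1) A = WB D (fun v => (A.count v : Int)) vals := by
  refine le_antisymm ?_ ?_
  · obtain ⟨B, hs, hg, hw⟩ := WB_exists D (fun _ => 1) A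
    rw [← hw, wsum_one]
    set S := B.dedup with hS
    have hSnd : S.Nodup := List.nodup_dedup B
    have hSsub : S.Subperm vals :=
      hSnd.subperm (fun a ha => (hmem a).mpr (hs.subset (List.dedup_sublist B |>.subset ha)))
    have hSg : Gd D S := List.Pairwise.sublist (List.dedup_sublist B) hg
    have hlen : (B.length : Int) = (S.map (fun v => (B.count v : Int))).sum := by
      rw [← List.sum_map_count_dedup_eq_length B, Nat.cast_list_sum, List.map_map]
      rfl
    have hle : (S.map (fun v => (B.count v : Int))).sum ≤ (S.map (fun v => (A.count v : Int))).sum := by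
      apply List.sum_le_sum
      intro v _
      exact_mod_cast hs.count_le v
    calc (B.length : Int) = _ := hlen
      _ ≤ _ := hle
      _ ≤ WB D (fun v => (A.count v : Int)) vals := WB_ge' D _ vals S hSsub hSg
  · obtain ⟨S, hs, hg, hw⟩ := WB_exists D (fun v => (A.count v : Int)) vals
    rw [← hw]
    set B := A.filter (fun a => decide (a ∈ S)) with hB
    have hBsub : B.Sublist A := List.filter_sublist
    have hSnd : S.Nodup := hnd.sublist hs
    have hBg : Gd D B := by
      refine List.pairwise_of_forall_mem_list fun a ha b hb => ?_
      have haS : a ∈ S := by simpa using List.of_mem_filter ha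
      have hbS : b ∈ S := by simpa using List.of_mem_filter hb
      by_cases hab : a = b
      · subst hab; simp; omega
      · exact List.Pairwise.forall (Gd_symm D) hg haS hbS hab
    have hwB : wsum (fun _ => 1) B = wsum (fun v => (A.count v : Int)) S := by
      rw [wsum_one]
      have : (B.length : Int) = ((A.countP (fun a => decide (a ∈ S)) : Nat) : Int) := by
        rw [hB, ← List.countP_eq_length_filter]
      rw [this, countP_mem_eq_sum A S hSnd]
      rfl
    rw [← hwB]
    exact WB_ge D _ A B hBsub hBg

theorem pymod_eq {D : Int} (hD : 0 < D) (v : Int) : PySem.Int.mod v D = v % D := by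
  simp [PySem.Int.mod, Int.fmod_eq_emod, hD.le]

theorem res_eq_of_conflict {D u v : Int} (hD : 0 < D) (h : |u - v| = D) : u % D = v % D := by
  rw [Int.emod_eq_emod_iff_emod_sub_eq_zero]
  refine Int.emod_eq_zero_of_dvd ?_
  rcases (abs_eq hD.le).mp h with h' | h'
  · exact ⟨1, by omega⟩
  · exact ⟨-1, by omega⟩

theorem WB_residue_split (D : Int) (hD : 0 < D) (w : Int → Int) :
    ∀ (R L : List Int), R.Nodup → (∀ v ∈ L, v % D ∈ R) →
    WB D w L = (R.map (fun r => WB D w (L.filter (fun v => v % D == r)))).sum := by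
  intro R
  induction R with
  | nil =>
    intro L _ hcov
    match L with
    | [] => simp [WB]
    | x :: L => exact absurd (hcov x (by simp)) (by simp)
  | cons r R ih =>
    intro L hnd hcov
    rw [List.nodup_cons] at hnd
    have hperm := List.filter_append_perm (fun v => v % D == r) L
    rw [WB_perm D w hperm.symm]
    rw [WB_append D w _ _ ?cross]
    case cross =>
      intro u hu v hv hUV
      have h1 : u % D = r := by simpa using List.of_mem_filter hu
      have h2 : ¬ (v % D = r) := by simpa using List.of_mem_filter hv
      exact h2 (res_eq_of_conflict hD ((abs_sub_comm u v) ▸ hUV) ▸ h1 ▸ (res_eq_of_conflict hD hUV).symm ▸ rfl)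
    have hcov' : ∀ v ∈ L.filter (fun v => !(v % D == r)), v % D ∈ R := by
      intro v hv
      have h2 : ¬ (v % D = r) := by simpa using List.of_mem_filter hv
      have := hcov v (List.mem_of_mem_filter hv)
      simpa [h2] using this
    rw [ih _ hnd.2 hcov']
    simp only [List.map_cons, List.sum_cons]
    congr 1
    apply congrArg
    apply List.map_congr_left
    intro r' hr'
    have hne : r' ≠ r := fun h => hnd.1 (h ▸ hr')
    congr 1
    rw [List.filter_filter]
    apply List.filter_congr
    intro v _
    by_cases h : v % D = r' <;> simp [h, hne]

theorem chainFold_go (cnt : PySem.Dict Int Int) (D : Int) (hD : 0 < D) :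
    ∀ (rest Q' : List Int) (p t s : Int),
    (∀ u ∈ Q', u ≤ p - D) →
    ((Q' ++ p :: rest).Pairwise (· < ·)) →
    (∀ u ∈ Q' ++ p :: rest, ∀ v ∈ Q' ++ p :: rest, D ∣ u - v) →
    (max t s = WB D (fun v => cnt.getD v 0) (Q' ++ [p])) →
    (s = WB D (fun v => cnt.getD v 0) Q') →
    (max (rest.foldl (pvStep cnt D) (t, s, some p)).1 (rest.foldl (pvStep cnt D) (t, s, some p)).2.1
      = WB D (fun v => cnt.getD v 0) ((Q' ++ [p]) ++ rest)) := by
  intro rest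
  induction rest with
  | nil =>
    intro Q' p t s _ _ _ ht _
    simpa using ht
  | cons v rest ih =>
    intro Q' p t s h1 hpw hres ht hs
    have hpv : p < v := by
      have h := (List.pairwise_append.mp hpw).2.1
      rw [List.pairwise_cons] at h
      exact h.1 v (by simp)
    have hdvd : D ∣ v - p := hres v (by simp) p (by simp)
    have hvpD : D ≤ v - p := Int.le_of_dvd (by omega) hdvd
    have hreassoc : (Q' ++ [p]) ++ v :: rest = Q' ++ p :: v :: rest := by simp
    have hpw' : ((Q' ++ [p]) ++ v :: rest).Pairwise (· < ·) := by rw [hreassoc]; exact hpw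
    have hres' : ∀ a ∈ (Q' ++ [p]) ++ v :: rest, ∀ b ∈ (Q' ++ [p]) ++ v :: rest, D ∣ a - b := by
      rw [hreassoc]; exact hres
    by_cases hcase : v - p = D
    · -- adjacent in the chain: take = skip + cnt[v]
      have hstep : pvStep cnt D (t, s, some p) v = (s + cnt.getD v 0, max t s, some v) := by
        simp [pvStep, hcase]
      have hfilter : (Q' ++ [p]).filter (fun u => |u - v| ≠ D) = Q' := by
        rw [List.filter_append]
        have h2 : [p].filter (fun u => |u - v| ≠ D) = [] := by
          have : |p - v| = D := by rw [abs_sub_comm]; rw [abs_of_pos (by omega)]; omega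
          simp [this]
        rw [h2, List.append_nil, List.filter_eq_self]
        intro u hu
        have hu1 := h1 u hu
        have : |u - v| = v - u := by rw [abs_sub_comm]; exact abs_of_pos (by omega)
        simp [this]; omega
      have hconcat := WB_concat D (fun v => cnt.getD v 0) (Q' ++ [p]) v
      rw [hfilter] at hconcat
      have ht' : max (s + cnt.getD v 0) (max t s) = WB D (fun v => cnt.getD v 0) ((Q' ++ [p]) ++ [v]) := by
        rw [hconcat, ← ht, ← hs]
        rw [max_comm, add_comm]
      have h1' : ∀ u ∈ Q' ++ [p], u ≤ v - D := by
        intro u hu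
        rcases List.mem_append.mp hu with h | h
        · have := h1 u h; omega
        · simp at h; omega
      have := ih (Q' ++ [p]) v (s + cnt.getD v 0) (max t s) h1' hpw' hres' ht' ht
      simp only [List.foldl_cons, hstep]
      rw [this]
      congr 1
      simp
    · -- gap of at least 2D: run restarts
      have hgap : 2 * D ≤ v - p := by
        have hdvd2 : D ∣ v - p - D := by
          exact dvd_sub hdvd ⟨1, by ring⟩
        have hne : v - p - D ≠ 0 := by omega
        have := Int.le_of_dvd (by omega) hdvd2
        omega
      have hstep : pvStep cnt D (t, s, some p) v = (max t s + cnt.getD v 0, max t s, some v) := by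
        simp [pvStep, hcase]
      have hfilter : (Q' ++ [p]).filter (fun u => |u - v| ≠ D) = Q' ++ [p] := by
        rw [List.filter_eq_self]
        intro u hu
        have hle : u ≤ p := by
          rcases List.mem_append.mp hu with h | h
          · have := h1 u h; omega
          · simp at h; omega
        have : |u - v| = v - u := by rw [abs_sub_comm]; exact abs_of_pos (by omega)
        simp [this]; omega
      have hconcat := WB_concat D (fun v => cnt.getD v 0) (Q' ++ [p]) v
      rw [hfilter] at hconcat
      have ht' : max (max t s + cnt.getD v 0) (max t s) = WB D (fun v => cnt.getD v 0) ((Q' ++ [p]) ++ [v]) := by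
        rw [hconcat, ← ht]
        rw [max_comm, add_comm]
      have h1' : ∀ u ∈ Q' ++ [p], u ≤ v - D := by
        intro u hu
        rcases List.mem_append.mp hu with h | h
        · have := h1 u h; omega
        · simp at h; omega
      have := ih (Q' ++ [p]) v (max t s + cnt.getD v 0) (max t s) h1' hpw' hres' ht' ht
      simp only [List.foldl_cons, hstep]
      rw [this]
      congr 1
      simp

theorem chainFold (cnt : PySem.Dict Int Int) (D : Int) (hD : 0 < D) (L : List Int)
    (hpw : L.Pairwise (· < ·)) (hres : ∀ u ∈ L, ∀ v ∈ L, D ∣ u - v) :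
    max (L.foldl (pvStep cnt D) (0, 0, none)).1 (L.foldl (pvStep cnt D) (0, 0, none)).2.1
      = WB D (fun v => cnt.getD v 0) L := by
  match L with
  | [] => simp [WB]
  | v :: rest =>
    have hstep : pvStep cnt D (0, 0, none) v = (max 0 0 + cnt.getD v 0, max 0 0, some v) := by
      simp [pvStep]
    have ht : max (max 0 0 + cnt.getD v 0) (max 0 0) = WB D (fun v => cnt.getD v 0) ([] ++ [v]) := by
      have h := WB_concat D (fun v => cnt.getD v 0) [] v
      simp only [List.nil_append] at h ⊢
      rw [h]
      simp [WB, max_comm]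
    have := chainFold_go cnt D hD rest [] v (max 0 0 + cnt.getD v 0) (max 0 0)
      (by simp) (by simpa using hpw) (by simpa using hres) ht (by simp [WB])
    simp only [List.foldl_cons, hstep]
    rw [this]
    simp

theorem pvOk_iff (D : Int) : ∀ (B : List Int), pvOk D B = true ↔ Gd D B := by
  intro B
  induction B with
  | nil => simp [pvOk, Gd]
  | cons x xs ih =>
    rw [pvOk, Gd, List.pairwise_cons]
    simp only [Bool.and_eq_true, List.all_eq_true, ih]
    constructor
    · rintro ⟨h1, h2⟩
      exact ⟨fun y hy => by simpa using h1 y hy, h2⟩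
    · rintro ⟨h1, h2⟩
      exact ⟨fun y hy => by simpa using h1 y hy, h2⟩

theorem pvAnyComb_iff (D : Int) (k : Nat) (A : List Int) :
    pvAnyComb D k A = true ↔ (k : Int) ≤ WB D (fun _ => 1) A := by
  constructor
  · intro h
    obtain ⟨B, hmem, hok⟩ := List.any_eq_true.mp h
    obtain ⟨hsub, hlen⟩ := List.mem_sublistsLen.mp hmem
    have := WB_ge D (fun _ => 1) A B hsub ((pvOk_iff D B).mp hok)
    rw [wsum_one, hlen] at this
    exact this
  · intro h
    obtain ⟨B, hsub, hg, hw⟩ := WB_exists D (fun _ => 1) A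
    rw [← hw, wsum_one] at h
    have hkB : k ≤ B.length := by exact_mod_cast h
    refine List.any_eq_true.mpr ⟨B.take k, List.mem_sublistsLen.mpr ⟨(List.take_sublist k B).trans hsub, by simp [hkB]⟩, ?_⟩
    exact (pvOk_iff D _).mpr (List.Pairwise.sublist (List.take_sublist k B) hg)

theorem pvLoopA_run (D : Int) (N : Int) (A : List Int) (hN : 0 ≤ N) :
    ∀ (n : Nat) (r0 : Int), r0 + n = max (N - WB D (fun _ => 1) A) 0 → 0 ≤ r0 →
    pvLoopA D N A (PySem.List.pyRange r0 (N + 1) 1) = max (N - WB D (fun _ => 1) A) 0 := by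
  have hM0 : 0 ≤ WB D (fun _ => 1) A := WB_nonneg D _ A
  intro n
  induction n with
  | zero =>
    intro r0 h0 hr0
    have htar : r0 = max (N - WB D (fun _ => 1) A) 0 := by omega
    have hrN : r0 ≤ N := by omega
    rw [PySem.List.pyRange_one_cons (by omega), pvLoopA]
    have hpred : pvAnyComb D (N - r0).toNat A = true := by
      rw [pvAnyComb_iff]
      have : ((N - r0).toNat : Int) = N - r0 := by omega
      rw [this]
      omega
    rw [hpred]
    simpa using htar
  | succ n ih =>
    intro r0 h0 hr0
    have hrN : r0 < N := by omega
    rw [PySem.List.pyRange_one_cons (by omega), pvLoopA]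
    have hpred : pvAnyComb D (N - r0).toNat A = false := by
      rw [← Bool.not_eq_true, pvAnyComb_iff]
      have : ((N - r0).toNat : Int) = N - r0 := by omega
      rw [this]
      omega
    rw [hpred]
    simp only [Bool.false_eq_true, if_false]
    exact ih (r0 + 1) (by omega) (by omega)

theorem guchoku_eq_aux (D : Int) (N : Int) (A : List Int) (hN : 0 ≤ N) :
    pvLoopA D N A (PySem.List.pyRange 0 (N + 1) 1) = max (N - WB D (fun _ => 1) A) 0 := by
  have hM0 : 0 ≤ WB D (fun _ => 1) A := WB_nonneg D _ A
  exact pvLoopA_run D N A hN (max (N - WB D (fun _ => 1) A) 0).toNat 0 (by omega) le_rfl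

theorem foldl_add_sum (f : List Int → Int) : ∀ (l : List (List Int)) (init : Int),
    l.foldl (fun g c => g + f c) init = init + (l.map f).sum := by
  intro l
  induction l with
  | nil => simp
  | cons c l ih => intro init; simp [ih, add_assoc]

theorem filtermap_pairs (g : Int → Int) (r : Int) : ∀ (vals : List Int),
    ((vals.map (fun v => (g v, v))).filter (fun p => p.1 == r)).map (fun p => p.2)
      = vals.filter (fun v => g v == r) := by
  intro vals
  induction vals with
  | nil => simp
  | cons v vals ih =>
    by_cases h : g v = r <;> simp [h, ih]

theorem alt_good_eq (D : Int) (A : List Int) (hD : 0 < D) :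
    (let cnt : PySem.Dict Int Int := A.foldl (fun d v => d.insert v (d.getD v 0 + 1)) PySem.Dict.empty
     let chains : PySem.Dict Int (List Int) :=
       (PySem.List.sorted cnt.keys (fun x => x) false).foldl
         (fun d v => d.modify (PySem.Int.mod v D) [] (· ++ [v])) PySem.Dict.empty
     chains.values.foldl
       (fun g chain =>
         let st := chain.foldl (pvStep cnt D) (0, 0, none)
         g + max st.1 st.2.1) 0)
    = WB D (fun _ => 1) A := by
  set cnt : PySem.Dict Int Int := A.foldl (fun d v => d.insert v (d.getD v 0 + 1)) PySem.Dict.empty with hcntdef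
  have hcnt : ∀ v, cnt.getD v 0 = (A.count v : Int) := by
    intro v
    rw [hcntdef, PySem.Dict.getD_foldl_insert_add_one]
    simp
  have hkeys : cnt.keys = PySem.Set.ofList A := by
    rw [hcntdef, PySem.Dict.keys_foldl_insert]
    simp [PySem.Set.update, PySem.Set.ofList_eq_foldl]
  set vals : List Int := PySem.List.sorted cnt.keys (fun x => x) false with hvalsdef
  have hvpw : vals.Pairwise (· < ·) := by
    rw [hvalsdef, hkeys]
    exact PySem.List.sorted_ofList_pairwise_lt A
  have hvnd : vals.Nodup := hvpw.imp (fun h => ne_of_lt h)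
  have hvmem : ∀ x, x ∈ vals ↔ x ∈ A := by
    intro x
    rw [hvalsdef, PySem.List.mem_sorted, hkeys, PySem.Set.mem_ofList]
  -- rewrite the Python '%' to Lean's emod (D > 0)
  have hmodfun : (fun (d : PySem.Dict Int (List Int)) v => d.modify (PySem.Int.mod v D) [] (· ++ [v]))
      = (fun d v => d.modify (v % D) [] (· ++ [v])) := by
    funext d v; rw [pymod_eq hD]
  set chains : PySem.Dict Int (List Int) :=
    vals.foldl (fun d v => d.modify (PySem.Int.mod v D) [] (· ++ [v])) PySem.Dict.empty with hchainsdef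
  have hchains' : chains = vals.foldl (fun d v => d.modify (v % D) [] (· ++ [v])) PySem.Dict.empty := by
    rw [hchainsdef, hmodfun]
  have hcnodup : chains.keys.Nodup := by
    rw [hchains']
    exact PySem.Dict.nodup_keys_foldl_modify_key vals (fun v => v % D) [] (fun d x => (· ++ [x])) _ (by simp)
  have hckeys : chains.keys = PySem.Set.ofList (vals.map (fun v => v % D)) := by
    rw [hchains', PySem.Dict.keys_foldl_modify_key vals (fun v => v % D) [] (fun d x => (· ++ [x]))]
    simp [PySem.Set.update, PySem.Set.ofList_eq_foldl]
  have hpairs : chains = List.foldl (fun (d : PySem.Dict Int (List Int)) p => d.modify p.1 [] (· ++ [p.2]))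
      PySem.Dict.empty (vals.map (fun v => (v % D, v))) := by
    rw [hchains', List.foldl_map]
  have hgetD : ∀ r, chains.getD r [] = vals.filter (fun v => v % D == r) := by
    intro r
    rw [hpairs, PySem.Dict.getD_foldl_modify_append, filtermap_pairs]
    simp
  have hvalues : chains.values = chains.keys.map (fun k => chains.getD k []) :=
    PySem.Dict.values_eq_map_keys chains hcnodup []
  -- evaluate the outer loop as a sum over residue chains
  rw [foldl_add_sum, hvalues, hckeys, List.map_map]
  have hchaineq : ∀ r, max ((chains.getD r []).foldl (pvStep cnt D) (0, 0, none)).1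
        ((chains.getD r []).foldl (pvStep cnt D) (0, 0, none)).2.1
      = WB D (fun v => cnt.getD v 0) (vals.filter (fun v => v % D == r)) := by
    intro r
    simp only [hgetD]
    refine chainFold cnt D hD _ (List.Pairwise.sublist List.filter_sublist hvpw) ?_
    intro u hu v hv
    have h1 : u % D = r := by simpa using List.of_mem_filter hu
    have h2 : v % D = r := by simpa using List.of_mem_filter hv
    exact Int.dvd_of_emod_eq_zero (Int.emod_eq_emod_iff_emod_sub_eq_zero.mp (h1.trans h2.symm))
  have hcntfun : (fun v => cnt.getD v 0) = (fun v => (A.count v : Int)) := funext hcnt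
  have hsplit := WB_residue_split D hD (fun v => (A.count v : Int))
    (PySem.Set.ofList (vals.map (fun v => v % D))) vals
    (PySem.Set.nodup_ofList _)
    (fun v hv => (PySem.Set.mem_ofList _ _).mpr (List.mem_map_of_mem hv))
  have hbridge := WB_bridge D hD A vals hvnd hvmem
  calc 0 + ((PySem.Set.ofList (vals.map (fun v => v % D))).map
        ((fun k => max ((chains.getD k []).foldl (pvStep cnt D) (0, 0, none)).1
          ((chains.getD k []).foldl (pvStep cnt D) (0, 0, none)).2.1))).sum
      = ((PySem.Set.ofList (vals.map (fun v => v % D))).map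
          (fun r => WB D (fun v => (A.count v : Int)) (vals.filter (fun v => v % D == r)))).sum := by
        rw [zero_add]
        apply congrArg
        apply List.map_congr_left
        intro r _
        exact (hchaineq r).trans (by rw [hcntfun])
    _ = WB D (fun v => (A.count v : Int)) vals := hsplit.symm
    _ = WB D (fun _ => 1) A := hbridge.symm

theorem guchoku_alt_eq (N D : Int) (A : List Int) :
    guchoku_alt N D A = max (N - WB D (fun _ => 1) A) 0 := by
  rw [guchoku_alt]
  by_cases h1 : D < 0
  · rw [if_pos h1, WB_neg D h1 A]
  · rw [if_neg h1]
    by_cases h2 : D = 0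
    · subst h2; rw [if_pos rfl, WB_zero]
    · have hD : 0 < D := by omega
      rw [if_neg h2]
      rw [alt_good_eq D A hD]

-- ===== VERDICT (by name: the statement is the Claim_ definition above) =====
theorem guchoku_spec : Claim_equal_guchoku := by
  intro N D A _ hPre
  unfold Spec_guchoku
  rw [guchoku, guchoku_eq_aux D N A hPre, guchoku_alt_eq]
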